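-- pv_equiv track=rewrite | github.com/sakaiproject/sakai | translation_helpers.py | create_new_translation
-- ===== SOURCE A (Python) =====
-- def parse_properties(file_content):
--     """Parses a .properties file content into a dictionary."""
--     properties = {}
--     lines = file_content.splitlines()
--     for line in lines:
--         line = line.strip()
--         if not line or line.startswith('#') or line.startswith('!'):
--             continue
--         if '=' in line:
--             key, value = line.split('=', 1)
--             properties[key.strip()] = value.strip()
--     return properties
--
-- def create_new_translation(default_content):
--     """
--     Creates new translation content from default content with TODO_TRANSLATE prefixes.
--     Returns a tuple: (new_translation_map, report_messages)
--     """
--     default_props = parse_properties(default_content)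
--     new_translation_map = {}
--     report_messages = []
--
--     for key, default_value in default_props.items():
--         new_translation_map[key] = f"TODO_TRANSLATE:{default_value}"
--     report_messages.append("INFO: Created new translation file with all keys prefixed with TODO_TRANSLATE.")
--     return new_translation_map, report_messages
-- ===== SOURCE B (Python) =====
-- def create_new_translation(default_content):
--     """Single fused pass: build the TODO_TRANSLATE map directly from the lines."""
--     new_translation_map = {}
--     for raw in default_content.splitlines():
--         line = raw.strip()
--         if not line or line[0] in "#!" or "=" not in line:
--             continue
--         key, value = line.split("=", 1)
--         new_translation_map[key.strip()] = "TODO_TRANSLATE:" + value.strip()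
--     return new_translation_map, ["INFO: Created new translation file with all keys prefixed with TODO_TRANSLATE."]
-- ===== Notes on version B (the rewrite author's own statement) =====
-- stated objective: simpler
-- what changed: Fused the two passes (parse_properties building an intermediate dict, then a second loop over its items re-inserting prefixed values) into one loop over splitlines that inserts the TODO_TRANSLATE-prefixed value directly, with the comment/'='-checks merged into a single skip condition.
import Mathlib
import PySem

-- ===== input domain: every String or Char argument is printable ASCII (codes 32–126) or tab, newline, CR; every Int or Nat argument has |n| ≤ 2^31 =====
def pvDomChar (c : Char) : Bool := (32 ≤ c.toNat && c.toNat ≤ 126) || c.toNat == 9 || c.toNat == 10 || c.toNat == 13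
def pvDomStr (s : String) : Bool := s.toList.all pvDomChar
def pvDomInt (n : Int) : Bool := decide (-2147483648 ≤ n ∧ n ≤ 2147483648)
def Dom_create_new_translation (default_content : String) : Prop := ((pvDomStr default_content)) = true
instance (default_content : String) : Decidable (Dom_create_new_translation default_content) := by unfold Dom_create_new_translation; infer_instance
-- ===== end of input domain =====

-- B fuses A's two passes (parse dict, then prefix loop) into one loop over the lines; objective: simpler.
-- ===== PORT A =====
def parse_properties (file_content : String) : PySem.Dict String String :=
  (PySem.Str.splitlines file_content).foldl (fun properties line₀ =>
    let line := PySem.Str.strip line₀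
    if line = "" ∨ PySem.Str.startswith line "#" = true ∨ PySem.Str.startswith line "!" = true then
      properties
    else if PySem.Str.isIn "=" line then
      match PySem.Str.splitMax? line "=" 1 with
      | some [key, value] => properties.insert (PySem.Str.strip key) (PySem.Str.strip value)
      | _ => properties  -- unreachable: '=' in line ⇒ split('=',1) yields exactly two pieces
    else properties) PySem.Dict.empty

def create_new_translation (default_content : String) : (List (String × String)) × List String :=
  let default_props := parse_properties default_content
  let new_translation_map :=
    default_props.items.foldl (fun m kv => m.insert kv.1 ("TODO_TRANSLATE:" ++ kv.2))
      PySem.Dict.empty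
  (new_translation_map.items,
   ["INFO: Created new translation file with all keys prefixed with TODO_TRANSLATE."])

-- ===== PORT B =====
def create_new_translation_alt (default_content : String) : (List (String × String)) × List String :=
  let m :=
    (PySem.Str.splitlines default_content).foldl (fun m raw =>
      let line := PySem.Str.strip raw
      if line = "" then m
      else
        match PySem.Str.pyGet? line 0 with  -- line[0]; some _ since line ≠ ""
        | none => m
        | some c =>
          if PySem.Str.isIn (String.ofList [c]) "#!" then m
          else if PySem.Str.isIn "=" line = false then m
          else
            match PySem.Str.splitMax? line "=" 1 with
            | some [key, value] =>
                m.insert (PySem.Str.strip key) ("TODO_TRANSLATE:" ++ PySem.Str.strip value)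
            | _ => m) PySem.Dict.empty
  (m.items,
   ["INFO: Created new translation file with all keys prefixed with TODO_TRANSLATE."])

-- ===== PRECONDITION & SPEC =====
def Spec_create_new_translation (default_content : String) (out : (List (String × String)) × List String) : Prop := out = create_new_translation_alt default_content
instance (default_content : String) (out : (List (String × String)) × List String) : Decidable (Spec_create_new_translation default_content out) := by unfold Spec_create_new_translation; infer_instance

-- ===== CLAIM (what is proved, stated in full; the proofs are below) =====
def Claim_equal_create_new_translation : Prop := ∀ (default_content : String), Dom_create_new_translation default_content → Spec_create_new_translation default_content (create_new_translation default_content)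

-- ===== LEMMAS AND PROOFS =====
def pvG (kv : String × String) : String × String := (kv.1, "TODO_TRANSLATE:" ++ kv.2)
theorem contains_of_items_map (m₁ m₂ : PySem.Dict String String)
    (h : m₂.items = m₁.items.map pvG) (k : String) : m₂.contains k = m₁.contains k := by
  rw [PySem.Dict.contains_eq_decide_mem_keys, PySem.Dict.contains_eq_decide_mem_keys]
  simp only [PySem.Dict.keys, h, List.map_map]
  simp [pvG, Function.comp]

theorem insert_map (m₁ m₂ : PySem.Dict String String) (h : m₂.items = m₁.items.map pvG)
    (k v : String) :
    (m₂.insert k ("TODO_TRANSLATE:" ++ v)).items = ((m₁.insert k v).items).map pvG := by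
  rw [PySem.Dict.items_insert, PySem.Dict.items_insert, contains_of_items_map m₁ m₂ h, h]
  by_cases hc : m₁.contains k = true
  · simp only [hc, if_true, List.map_map]
    apply List.map_congr_left
    intro p _
    by_cases hp : p.1 == k <;> simp [pvG, Function.comp, hp]
  · simp only [hc, Bool.not_eq_true] at *
    simp [pvG]

theorem head_cond (line : String) (c : Char) (hc : line.toList[0]? = some c) :
    PySem.Str.isIn (String.ofList [c]) "#!" =
      (PySem.Str.startswith line "#" || PySem.Str.startswith line "!") := by
  rcases hl : line.toList with _ | ⟨d, rest⟩
  · simp [hl] at hc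
  · simp [hl] at hc
    obtain rfl : c = d := hc.symm
    have h1 : PySem.Str.isIn (String.ofList [c]) "#!" = true ↔ c = '#' ∨ c = '!' := by
      rw [PySem.Str.isIn_iff_infix]
      constructor
      · intro h
        have := h.mem (a := c) (by simp)
        simpa using this
      · rintro (rfl | rfl) <;> decide
    have h2 : PySem.Str.startswith line "#" = true ↔ c = '#' := by
      rw [PySem.Str.startswith_eq, PySem.Chars.startswith_iff, hl]
      constructor
      · intro h; rcases h with ⟨t, ht⟩; simp at ht; exact ht.1.symm
      · rintro rfl; exact ⟨rest, by simp⟩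
    have h3 : PySem.Str.startswith line "!" = true ↔ c = '!' := by
      rw [PySem.Str.startswith_eq, PySem.Chars.startswith_iff, hl]
      constructor
      · intro h; rcases h with ⟨t, ht⟩; simp at ht; exact ht.1.symm
      · rintro rfl; exact ⟨rest, by simp⟩
    rw [Bool.eq_iff_iff]
    simp only [Bool.or_eq_true, h1, h2, h3]

theorem loop_items (lines : List String) (m₁ m₂ : PySem.Dict String String)
    (h : m₂.items = m₁.items.map pvG) :
    (lines.foldl (fun m raw =>
      let line := PySem.Str.strip raw
      if line = "" then m
      else
        match PySem.Str.pyGet? line 0 with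
        | none => m
        | some c =>
          if PySem.Str.isIn (String.ofList [c]) "#!" then m
          else if PySem.Str.isIn "=" line = false then m
          else
            match PySem.Str.splitMax? line "=" 1 with
            | some [key, value] =>
                m.insert (PySem.Str.strip key) ("TODO_TRANSLATE:" ++ PySem.Str.strip value)
            | _ => m) m₂).items =
    ((lines.foldl (fun properties line₀ =>
      let line := PySem.Str.strip line₀
      if line = "" ∨ PySem.Str.startswith line "#" = true ∨ PySem.Str.startswith line "!" = true then
        properties
      else if PySem.Str.isIn "=" line then
        match PySem.Str.splitMax? line "=" 1 with
        | some [key, value] => properties.insert (PySem.Str.strip key) (PySem.Str.strip value)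
        | _ => properties
      else properties) m₁).items).map pvG := by
  induction lines generalizing m₁ m₂ with
  | nil => exact h
  | cons raw lines ih =>
    simp only [List.foldl_cons]
    by_cases h0 : PySem.Str.strip raw = ""
    · rw [if_pos h0, if_pos (Or.inl h0)]
      exact ih _ _ h
    · rw [if_neg h0]
      have hnil : PySem.Str.strip raw ≠ "" := h0
      rcases hl : (PySem.Str.strip raw).toList with _ | ⟨d, rest⟩
      · exact absurd (String.ext hl) h0
      have hget : PySem.Str.pyGet? (PySem.Str.strip raw) 0 = some d := by
        simp [hl]
      rw [hget]
      have hb := head_cond (PySem.Str.strip raw) d (by simp [hl])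
      simp only [hb]
      by_cases hsw : (PySem.Str.startswith (PySem.Str.strip raw) "#" || PySem.Str.startswith (PySem.Str.strip raw) "!") = true
      · rw [if_pos hsw]
        rw [if_pos (Or.inr (by simp only [Bool.or_eq_true] at hsw; exact hsw))]
        exact ih _ _ h
      · rw [if_neg hsw]
        have hsw' := hsw
        simp only [Bool.or_eq_true, not_or, Bool.not_eq_true] at hsw'
        have hA : ¬(PySem.Str.strip raw = "" ∨ PySem.Str.startswith (PySem.Str.strip raw) "#" = true ∨ PySem.Str.startswith (PySem.Str.strip raw) "!" = true) := by
          rintro (h1 | h2 | h3)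
          · exact h0 h1
          · rw [hsw'.1] at h2; exact Bool.false_ne_true h2
          · rw [hsw'.2] at h3; exact Bool.false_ne_true h3
        rw [if_neg hA]
        by_cases he : PySem.Str.isIn "=" (PySem.Str.strip raw) = true
        · rw [if_neg (by simp only [he]; simp), if_pos he]
          rcases hsp : PySem.Str.splitMax? (PySem.Str.strip raw) "=" 1 with _ | l
          · exact ih _ _ h
          · match l with
            | [] => exact ih _ _ h
            | [x] => exact ih _ _ h
            | [key, value] => exact ih _ _ (insert_map _ _ h _ _)
            | x :: y :: z :: t => exact ih _ _ h
        · simp only [Bool.not_eq_true] at he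
          rw [if_pos he, if_neg (by simp only [he]; simp)]
          exact ih _ _ h

theorem nodup_fold (lines : List String) (d : PySem.Dict String String) (hd : d.keys.Nodup) :
    ((lines.foldl (fun properties line₀ =>
      let line := PySem.Str.strip line₀
      if line = "" ∨ PySem.Str.startswith line "#" = true ∨ PySem.Str.startswith line "!" = true then
        properties
      else if PySem.Str.isIn "=" line then
        match PySem.Str.splitMax? line "=" 1 with
        | some [key, value] => properties.insert (PySem.Str.strip key) (PySem.Str.strip value)
        | _ => properties
      else properties) d)).keys.Nodup := by
  induction lines generalizing d with
  | nil => exact hd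
  | cons raw lines ih =>
    rw [List.foldl_cons]
    apply ih
    dsimp only
    split_ifs with h1 h2
    · exact hd
    · rcases hsp : PySem.Str.splitMax? (PySem.Str.strip raw) "=" 1 with _ | l
      · exact hd
      · match l with
        | [] => exact hd
        | [x] => exact hd
        | [key, value] => exact PySem.Dict.nodup_keys_insert _ _ _ hd
        | x :: y :: z :: t => exact hd
    · exact hd

theorem second_fold (props : PySem.Dict String String) (hnd : props.keys.Nodup) :
    (props.items.foldl (fun m kv => m.insert kv.1 ("TODO_TRANSLATE:" ++ kv.2))
      PySem.Dict.empty).items = props.items.map pvG := by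
  rw [PySem.Dict.items_foldl_insert_fresh props.items (fun kv => kv.1)
        (fun kv => "TODO_TRANSLATE:" ++ kv.2) PySem.Dict.empty
        (by intro a _; simp) (by simpa [PySem.Dict.keys] using hnd)]
  rfl

theorem parse_nodup (s : String) : (parse_properties s).keys.Nodup := by
  unfold parse_properties
  exact nodup_fold _ _ PySem.Dict.nodup_keys_empty

-- ===== VERDICT (by name: the statement is the Claim_ definition above) =====
theorem create_new_translation_spec : Claim_equal_create_new_translation := by
  intro s _
  unfold Spec_create_new_translation create_new_translation create_new_translation_alt
  refine Prod.ext ?_ rfl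
  dsimp only
  rw [second_fold _ (parse_nodup s)]
  unfold parse_properties
  exact (loop_items (PySem.Str.splitlines s) PySem.Dict.empty PySem.Dict.empty rfl).symm
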